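-- pv_equiv track=rewrite | github.com/0xdarkman/pythia | pythia/core/environment/crypto_ai_environment.py | _make_coin_to_index
-- ===== SOURCE A (Python) =====
-- def _make_coin_to_index(action_mapping, start_coin):
--     coin_index = dict()
--     i = 0
--     coin_index[start_coin] = i
--     for coin in action_mapping.values():
--         if coin not in coin_index:
--             i += 1
--             coin_index[coin] = i
--     return coin_index
-- ===== SOURCE B (Python) =====
-- def _make_coin_to_index(action_mapping, start_coin):
--     seq = [start_coin, *action_mapping.values()]
--     first = {}
--     for pos, coin in reversed(list(enumerate(seq))):
--         first[coin] = pos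
--     order = sorted(first, key=first.get)
--     return {coin: rank for rank, coin in enumerate(order)}
-- ===== Notes on version B (the rewrite author's own statement) =====
-- stated objective: alternative
-- what changed: Instead of one forward pass with a running counter and membership test, B makes a reverse pass recording each coin's first-occurrence position in a dict, sorts the coins by that position, and assigns indices by ranking the sorted order.
import Mathlib
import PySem

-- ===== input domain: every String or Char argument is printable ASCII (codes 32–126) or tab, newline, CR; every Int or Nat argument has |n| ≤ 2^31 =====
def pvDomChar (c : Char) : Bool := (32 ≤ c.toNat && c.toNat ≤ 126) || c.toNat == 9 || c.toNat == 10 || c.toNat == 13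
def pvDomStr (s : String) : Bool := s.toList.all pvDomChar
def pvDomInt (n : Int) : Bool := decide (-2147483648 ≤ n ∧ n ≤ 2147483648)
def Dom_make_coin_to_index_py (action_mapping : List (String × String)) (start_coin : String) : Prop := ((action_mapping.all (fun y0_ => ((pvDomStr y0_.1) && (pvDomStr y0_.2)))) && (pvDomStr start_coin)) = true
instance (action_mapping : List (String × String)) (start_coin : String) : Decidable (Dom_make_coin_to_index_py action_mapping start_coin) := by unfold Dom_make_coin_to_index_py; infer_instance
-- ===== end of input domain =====

-- B replaces A's single forward counter loop by: a reverse pass recording first-occurrence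
-- positions, a sort by that position, and a ranking pass (alternative algorithm; same result).

-- ===== PORT A =====
-- dict coin_index with the running counter i carried as a pair through the loop over action_mapping.values()
def make_coin_to_index_py (action_mapping : List (String × String)) (start_coin : String) : List (String × Int) :=
  ((action_mapping.map (·.2)).foldl
    (fun (s : PySem.Dict String Int × Int) coin =>
      if s.1.contains coin then s else (s.1.insert coin (s.2 + 1), s.2 + 1))
    ((PySem.Dict.empty : PySem.Dict String Int).insert start_coin 0, 0)).1.items

-- ===== PORT B =====
-- seq = [start_coin, *values]; for pos, coin in reversed(list(enumerate(seq))): first[coin] = pos;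
-- order = sorted(first, key=first.get)  (every key is in first, so first.get k = first.getD k 0 here — exact);
-- {coin: rank for rank, coin in enumerate(order)}: the keys are distinct, so the dict IS this pair list.
def make_coin_to_index_py_alt (action_mapping : List (String × String)) (start_coin : String) : List (String × Int) :=
  let seq := start_coin :: action_mapping.map (·.2)
  let first := ((PySem.List.enumerate seq).reverse).foldl
    (fun (d : PySem.Dict String Int) p => d.insert p.2 p.1) PySem.Dict.empty
  let order := PySem.List.sorted first.keys (fun k => first.getD k 0)
  (PySem.List.enumerate order).map (fun p => (p.2, p.1))

-- ===== PRECONDITION & SPEC =====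
def Spec_make_coin_to_index_py (action_mapping : List (String × String)) (start_coin : String) (out : List (String × Int)) : Prop := out = make_coin_to_index_py_alt action_mapping start_coin
instance (action_mapping : List (String × String)) (start_coin : String) (out : List (String × Int)) : Decidable (Spec_make_coin_to_index_py action_mapping start_coin out) := by unfold Spec_make_coin_to_index_py; infer_instance

-- ===== CLAIM (what is proved, stated in full; the proofs are below) =====
def Claim_equal_make_coin_to_index_py : Prop := ∀ (action_mapping : List (String × String)) (start_coin : String), Dom_make_coin_to_index_py action_mapping start_coin → Spec_make_coin_to_index_py action_mapping start_coin (make_coin_to_index_py action_mapping start_coin)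

-- ===== LEMMAS AND PROOFS =====

-- the (coin, index) pair list built from an ordered key list u
def pvEnumList (u : List String) : List (String × Int) :=
  (PySem.List.enumerate u).map (fun p => (p.2, p.1))

def pvMkD (u : List String) : PySem.Dict String Int := PySem.Dict.mk (pvEnumList u)

theorem pvKeys_mkD (u : List String) : (pvMkD u).keys = u := by
  simp [pvMkD, pvEnumList, PySem.Dict.keys, List.map_map, Function.comp_def,
    PySem.List.map_snd_enumerate]

theorem pvContains_mkD (u : List String) (c : String) :
    (pvMkD u).contains c = u.contains c := by
  rw [PySem.Dict.contains_eq_decide_mem_keys, pvKeys_mkD]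
  simp

theorem pvEnumList_append (u : List String) (c : String) :
    pvEnumList (u ++ [c]) = pvEnumList u ++ [(c, (u.length : Int))] := by
  simp [pvEnumList, PySem.List.enumerate_append, PySem.List.enumerate_cons,
    PySem.List.enumerate_nil]

theorem pvInsert_mkD (u : List String) (c : String) (h : (pvMkD u).contains c = false) :
    (pvMkD u).insert c (u.length : Int) = pvMkD (u ++ [c]) := by
  apply PySem.Dict.ext
  rw [PySem.Dict.items_insert_of_not_contains _ _ h]
  simp [pvMkD, pvEnumList_append]

-- A's loop, characterised: it maintains exactly the dict of the deduplicated list seen so far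
theorem pvLoopA (cs : List String) : ∀ (u : List String), u ≠ [] →
    cs.foldl
      (fun (s : PySem.Dict String Int × Int) coin =>
        if s.1.contains coin then s else (s.1.insert coin (s.2 + 1), s.2 + 1))
      (pvMkD u, (u.length : Int) - 1)
    = (pvMkD (cs.foldl PySem.Set.add u), ((cs.foldl PySem.Set.add u).length : Int) - 1) := by
  induction cs with
  | nil => intro u _; simp
  | cons c cs ih =>
    intro u hu
    simp only [List.foldl_cons]
    by_cases hc : (pvMkD u).contains c = true
    · have hadd : PySem.Set.add u c = u := by
        rw [pvContains_mkD] at hc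
        simp only [PySem.Set.add, PySem.Set.contains]
        simp only [List.contains_eq_mem] at hc ⊢
        simp [hc]
      rw [if_pos hc, hadd]
      exact ih u hu
    · have hc' : (pvMkD u).contains c = false := by
        cases h : (pvMkD u).contains c <;> simp_all
      have hmem : u.contains c = false := by rw [← pvContains_mkD]; exact hc'
      have hadd : PySem.Set.add u c = u ++ [c] := by
        simp only [PySem.Set.add, PySem.Set.contains]
        simp only [List.contains_eq_mem] at hmem ⊢
        simp [hmem]
      have hlen : ((u.length : Int) - 1) + 1 = (u.length : Int) := by ring
      rw [if_neg (by simp [hc']), hlen, pvInsert_mkD u c hc', hadd]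
      have h2 := ih (u ++ [c]) (by simp)
      have hl2 : (((u ++ [c]).length : Int)) - 1 = (u.length : Int) := by
        simp [List.length_append]
      rw [hl2] at h2
      exact h2

theorem pvD0_eq (start_coin : String) :
    ((PySem.Dict.empty : PySem.Dict String Int).insert start_coin 0) = pvMkD [start_coin] := by
  apply PySem.Dict.ext
  rw [PySem.Dict.items_insert_of_not_contains _ _ (by simp)]
  simp [pvMkD, pvEnumList, PySem.Dict.empty, PySem.List.enumerate_cons, PySem.List.enumerate_nil]

theorem pvDedup_cons (start_coin : String) (cs : List String) :
    PySem.List.dedup (start_coin :: cs) = cs.foldl PySem.Set.add [start_coin] := by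
  rw [PySem.List.dedup_eq_ofList, PySem.Set.ofList_eq_foldl, List.foldl_cons]
  congr 1

-- A = pvEnumList (dedup seq)
theorem pvA_eq (am : List (String × String)) (sc : String) :
    make_coin_to_index_py am sc = pvEnumList (PySem.List.dedup (sc :: am.map (·.2))) := by
  unfold make_coin_to_index_py
  rw [pvD0_eq, pvDedup_cons]
  have h := pvLoopA (am.map (·.2)) [sc] (by simp)
  norm_num at h
  rw [h]
  rfl

-- B's reverse pass: the resulting dict maps each coin of xs to its FIRST occurrence position
theorem pvGetD_revFold (xs : List String) : ∀ (s : Int) (d : PySem.Dict String Int) (c : String),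
    (((PySem.List.enumerate xs s).reverse).foldl
        (fun (d : PySem.Dict String Int) p => d.insert p.2 p.1) d).getD c 0 =
      if c ∈ xs then s + (xs.idxOf c : Int) else d.getD c 0 := by
  induction xs with
  | nil => intro s d c; simp [PySem.List.enumerate_nil]
  | cons x xs ih =>
    intro s d c
    rw [PySem.List.enumerate_cons]
    simp only [List.reverse_cons, List.foldl_append, List.foldl_cons, List.foldl_nil]
    rw [PySem.Dict.getD_insert]
    by_cases hcx : c = x
    · subst hcx
      simp [List.idxOf_cons_self]
    · rw [if_neg hcx, ih]
      by_cases hm : c ∈ xs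
      · rw [if_pos hm, if_pos (by simp [hm]), List.idxOf_cons_ne _ (by simpa using (Ne.symm hcx))]
        push_cast
        ring
      · rw [if_neg hm, if_neg (by simp [hcx, hm])]

-- B's reverse pass: the key list is the distinct coins (as a set of seq.reverse)
theorem pvKeys_revFold (xs : List String) (s : Int) :
    (((PySem.List.enumerate xs s).reverse).foldl
        (fun (d : PySem.Dict String Int) p => d.insert p.2 p.1) PySem.Dict.empty).keys
      = PySem.Set.ofList xs.reverse := by
  have h := PySem.Dict.keys_foldl_insert_key (ν := Int)
    ((PySem.List.enumerate xs s).reverse) (fun p => p.2) (fun _ p => p.1) PySem.Dict.empty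
  simp only [] at h
  rw [h, PySem.Dict.keys_empty, List.map_reverse, PySem.List.map_snd_enumerate,
      PySem.Set.ofList_eq_foldl]
  rfl

-- first-occurrence dedup lists its elements in strictly increasing first-index order
theorem pvOfList_pairwise_idxOf (xs : List String) :
    (PySem.Set.ofList xs).Pairwise (fun a b => xs.idxOf a < xs.idxOf b) := by
  induction xs with
  | nil => simp [PySem.Set.ofList_nil]
  | cons x xs ih =>
    rw [PySem.Set.ofList_cons, List.pairwise_cons]
    constructor
    · intro b hb
      obtain ⟨hbmem, hbx⟩ := (PySem.Set.mem_discard _ _ _).mp hb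
      rw [List.idxOf_cons_self, List.idxOf_cons_ne _ (by simpa using (Ne.symm hbx))]
      omega
    · have hsub : ((PySem.Set.ofList xs).discard x).Sublist (PySem.Set.ofList xs) :=
        List.filter_sublist
      have hpw := ih.sublist hsub
      refine List.Pairwise.imp_of_mem ?_ hpw
      intro a b ha hb hab
      obtain ⟨_, hax⟩ := (PySem.Set.mem_discard _ _ _).mp ha
      obtain ⟨_, hbx⟩ := (PySem.Set.mem_discard _ _ _).mp hb
      rw [List.idxOf_cons_ne _ (by simpa using (Ne.symm hax)),
          List.idxOf_cons_ne _ (by simpa using (Ne.symm hbx))]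
      omega

-- B = pvEnumList (dedup seq): the sort by first position reproduces first-occurrence order
theorem pvB_eq (am : List (String × String)) (sc : String) :
    make_coin_to_index_py_alt am sc = pvEnumList (PySem.List.dedup (sc :: am.map (·.2))) := by
  unfold make_coin_to_index_py_alt
  simp only []
  set seq := sc :: am.map (·.2) with hseq
  set first := ((PySem.List.enumerate seq).reverse).foldl
    (fun (d : PySem.Dict String Int) p => d.insert p.2 p.1) PySem.Dict.empty with hfirst
  have hkeys : first.keys = PySem.Set.ofList seq.reverse := pvKeys_revFold seq 0
  have horder : PySem.List.sorted first.keys (fun k => first.getD k 0) = PySem.List.dedup seq := by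
    apply PySem.List.sorted_eq_of_perm_of_pairwise_lt
    · -- (dedup seq).Perm first.keys
      rw [hkeys, PySem.List.dedup_eq_ofList]
      apply (List.perm_ext_iff_of_nodup (PySem.Set.nodup_ofList _) (PySem.Set.nodup_ofList _)).mpr
      intro a
      rw [PySem.Set.mem_ofList, PySem.Set.mem_ofList, List.mem_reverse]
    · -- strictly increasing key along dedup seq
      rw [PySem.List.dedup_eq_ofList]
      refine List.Pairwise.imp_of_mem ?_ (pvOfList_pairwise_idxOf seq)
      intro a b ha hb hab
      have hga := pvGetD_revFold seq 0 PySem.Dict.empty a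
      have hgb := pvGetD_revFold seq 0 PySem.Dict.empty b
      rw [if_pos ((PySem.Set.mem_ofList _ _).mp ha)] at hga
      rw [if_pos ((PySem.Set.mem_ofList _ _).mp hb)] at hgb
      rw [← hfirst] at hga hgb
      rw [hga, hgb]
      omega
  rw [horder]
  rfl

-- ===== VERDICT (by name: the statement is the Claim_ definition above) =====
theorem make_coin_to_index_py_spec : Claim_equal_make_coin_to_index_py := by
  intro am sc _
  unfold Spec_make_coin_to_index_py
  rw [pvA_eq, pvB_eq]
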